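-- pv_equiv track=rewrite | github.com/smysle/vps-stock-monitor | src/utils/affiliate.py | _get_param_name
-- ===== SOURCE A (Python) =====
-- from typing import Dict, Optional
--
-- AFFILIATE_PARAM_FORMATS = {
--     # 搬瓦工 - 使用 aff 参数
--     "bandwagonhost.com": "aff",
--     "bwh81.net": "aff",
--     "bwh88.net": "aff",
--     "bwh89.net": "aff",
--
--     # DMIT - 使用 aff 参数
--     "dmit.io": "aff",
--
--     # RackNerd - 使用 aff 参数
--     "racknerd.com": "aff",
--     "my.racknerd.com": "aff",
--
--     # HostDare - 使用 aff 参数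
--     "hostdare.com": "aff",
--     "manage.hostdare.com": "aff",
--
--     # GreenCloudVPS - 使用 aff 参数
--     "greencloudvps.com": "aff",
--
--     # CloudCone - 使用 ref 参数
--     "cloudcone.com": "ref",
--     "app.cloudcone.com": "ref",
--
--     # Spartan Host - 使用 aff 参数
--     "spartanhost.net": "aff",
--     "billing.spartanhost.net": "aff",
--
--     # BuyVM/Frantech - 使用 aff 参数
--     "buyvm.net": "aff",
--     "my.frantech.ca": "aff",
--
--     # Vultr - 使用 ref 参数
--     "vultr.com": "ref",
--
--     # DigitalOcean - 使用 refcode 参数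
--     "digitalocean.com": "refcode",
--
--     # Linode - 使用 r 参数
--     "linode.com": "r",
--
--     # Hosteons - 使用 aff 参数
--     "hosteons.com": "aff",
--
--     # AlphaVPS - 使用 aff 参数
--     "alphavps.com": "aff",
--
--     # Contabo - 无标准推广参数，通常使用专属链接
--     "contabo.com": None,
--
--     # Hetzner - 使用 ref 参数
--     "hetzner.com": "ref",
-- }
--
-- def _match_domain(url_domain: str, config_domain: str) -> bool:
--     """
--     安全的域名匹配
--
--     Args:
--         url_domain: URL 中的域名
--         config_domain: 配置中的域名
--
--     Returns:
--         是否匹配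
--     """
--     url_domain = url_domain.lower().strip()
--     config_domain = config_domain.lower().strip()
--
--     # 精确匹配
--     if url_domain == config_domain:
--         return True
--
--     # 子域名匹配：url_domain 必须以 .config_domain 结尾
--     # 例如：my.racknerd.com 匹配 racknerd.com
--     if url_domain.endswith('.' + config_domain):
--         return True
--
--     return False
--
-- def _get_param_name(domain: str) -> Optional[str]:
--     """获取站点的推广参数名"""
--     domain = domain.lower().strip()
--
--     # 精确匹配
--     if domain in AFFILIATE_PARAM_FORMATS:
--         return AFFILIATE_PARAM_FORMATS[domain]
--
--     # 安全的子域名匹配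
--     for known_domain, param in AFFILIATE_PARAM_FORMATS.items():
--         if _match_domain(domain, known_domain):
--             return param
--
--     # 默认使用 aff
--     return "aff"
-- ===== SOURCE B (Python) =====
-- from typing import Dict, Optional
--
-- AFFILIATE_PARAM_FORMATS = {
--     "bandwagonhost.com": "aff",
--     "bwh81.net": "aff",
--     "bwh88.net": "aff",
--     "bwh89.net": "aff",
--     "dmit.io": "aff",
--     "racknerd.com": "aff",
--     "my.racknerd.com": "aff",
--     "hostdare.com": "aff",
--     "manage.hostdare.com": "aff",
--     "greencloudvps.com": "aff",
--     "cloudcone.com": "ref",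
--     "app.cloudcone.com": "ref",
--     "spartanhost.net": "aff",
--     "billing.spartanhost.net": "aff",
--     "buyvm.net": "aff",
--     "my.frantech.ca": "aff",
--     "vultr.com": "ref",
--     "digitalocean.com": "refcode",
--     "linode.com": "r",
--     "hosteons.com": "aff",
--     "alphavps.com": "aff",
--     "contabo.com": None,
--     "hetzner.com": "ref",
-- }
--
-- def _get_param_name(domain: str) -> Optional[str]:
--     """Walk the suffix chain of the domain (dropping one label at a time) and
--     look each candidate up directly in the dict; default to "aff"."""
--     cand = domain.lower().strip()
--     while True:
--         if cand in AFFILIATE_PARAM_FORMATS: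
--             return AFFILIATE_PARAM_FORMATS[cand]
--         dot = cand.find('.')
--         if dot == -1:
--             return "aff"
--         cand = cand[dot + 1:]
-- ===== Notes on version B (the rewrite author's own statement) =====
-- stated objective: alternative
-- what changed: Instead of a membership test plus a linear scan over every dict entry with a subdomain matcher, B walks the suffix chain of the input, dropping one leading label at a time and doing a direct dict lookup per suffix, falling back to the module-wide default parameter name.
import Mathlib
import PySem

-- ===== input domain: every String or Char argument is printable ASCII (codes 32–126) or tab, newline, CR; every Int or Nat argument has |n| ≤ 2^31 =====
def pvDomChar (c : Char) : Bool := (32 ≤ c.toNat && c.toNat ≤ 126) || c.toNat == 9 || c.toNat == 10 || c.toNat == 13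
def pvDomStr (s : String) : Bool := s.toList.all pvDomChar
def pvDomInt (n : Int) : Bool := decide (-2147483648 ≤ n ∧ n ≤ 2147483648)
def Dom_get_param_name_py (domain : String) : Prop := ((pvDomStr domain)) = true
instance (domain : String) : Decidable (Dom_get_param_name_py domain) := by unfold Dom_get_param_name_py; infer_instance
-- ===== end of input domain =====

-- B replaces A's membership test plus full scan of the dict with a walk down the
-- suffix chain of the domain (dropping one label at a time), one dict lookup per suffix.

-- ===== PORT A =====
-- AFFILIATE_PARAM_FORMATS (dict literal, distinct keys, insertion order)
def AFP : PySem.Dict String (Option String) := PySem.Dict.mk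
  [ ("bandwagonhost.com", some "aff"), ("bwh81.net", some "aff"), ("bwh88.net", some "aff"),
    ("bwh89.net", some "aff"), ("dmit.io", some "aff"), ("racknerd.com", some "aff"),
    ("my.racknerd.com", some "aff"), ("hostdare.com", some "aff"), ("manage.hostdare.com", some "aff"),
    ("greencloudvps.com", some "aff"), ("cloudcone.com", some "ref"), ("app.cloudcone.com", some "ref"),
    ("spartanhost.net", some "aff"), ("billing.spartanhost.net", some "aff"), ("buyvm.net", some "aff"),
    ("my.frantech.ca", some "aff"), ("vultr.com", some "ref"), ("digitalocean.com", some "refcode"),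
    ("linode.com", some "r"), ("hosteons.com", some "aff"), ("alphavps.com", some "aff"),
    ("contabo.com", none), ("hetzner.com", some "ref") ]

-- _match_domain
def match_domain_py (url_domain config_domain : String) : Bool :=
  let url := PySem.Str.strip (PySem.Str.lower url_domain)
  let cfg := PySem.Str.strip (PySem.Str.lower config_domain)
  if url == cfg then true
  else if PySem.Str.endswith url ("." ++ cfg) then true
  else false

-- _get_param_name: exact membership + index, else first matching item, else "aff"
def get_param_name_py (domain : String) : Option String :=
  -- d = domain.lower().strip(), written out at each use
  if AFP.contains (PySem.Str.strip (PySem.Str.lower domain)) then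
    (AFP.get? (PySem.Str.strip (PySem.Str.lower domain))).getD none  -- key present: AFFILIATE_PARAM_FORMATS[d]
  else
    match AFP.items.find? (fun kv => match_domain_py (PySem.Str.strip (PySem.Str.lower domain)) kv.1) with
    | some kv => kv.2
    | none => some "aff"

-- ===== PORT B =====
-- the while-loop of Source B over the candidate string (as List Char);
-- cand[dot+1:] with dot = cand.find('.') ≥ 0 is exactly List.drop (dot.toNat + 1)
def altLoop (cand : List Char) : Option String :=
  if AFP.contains (String.ofList cand) then (AFP.get? (String.ofList cand)).getD none
  else if hdot : PySem.Chars.find cand ['.'] = -1 then some "aff"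
  else altLoop (cand.drop ((PySem.Chars.find cand ['.']).toNat + 1))
termination_by cand.length
decreasing_by
  have h0 : 0 ≤ PySem.Chars.find cand ['.'] := by
    have := PySem.Chars.neg_one_le_find cand ['.']
    omega
  have hin : ['.'] <:+: cand := (PySem.Chars.find_nonneg_iff cand ['.']).mp h0
  have : cand ≠ [] := by
    intro h; subst h
    exact absurd hin.length_le (by simp)
  have : 0 < cand.length := List.length_pos_iff.mpr this
  simp only [List.length_drop]
  omega

def get_param_name_py_alt (domain : String) : Option String :=
  altLoop (PySem.Str.strip (PySem.Str.lower domain)).toList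

-- ===== PRECONDITION & SPEC =====
def Spec_get_param_name_py (domain : String) (out : Option String) : Prop := out = get_param_name_py_alt domain
instance (domain : String) (out : Option String) : Decidable (Spec_get_param_name_py domain out) := by unfold Spec_get_param_name_py; infer_instance

-- ===== CLAIM (what is proved, stated in full; the proofs are below) =====
def Claim_equal_get_param_name_py : Prop := ∀ (domain : String), Dom_get_param_name_py domain → Spec_get_param_name_py domain (get_param_name_py domain)

-- ===== LEMMAS AND PROOFS =====

-- ---- character-level facts ----
theorem char_le_iff (a c : Char) : (a ≤ c) ↔ a.toNat ≤ c.toNat := by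
  rw [Char.le_def, UInt32.le_iff_toNat_le]; rfl

theorem isupper_iff (c : Char) : PySem.Chars.isupper c = true ↔ 65 ≤ c.toNat ∧ c.toNat ≤ 90 := by
  unfold PySem.Chars.isupper
  simp only [Bool.and_eq_true, decide_eq_true_eq, char_le_iff,
    show 'A'.toNat = 65 from rfl, show 'Z'.toNat = 90 from rfl]

theorem toNat_lower (c : Char) (h : 65 ≤ c.toNat) (h2 : c.toNat ≤ 90) :
    (Char.ofNat (c.toNat + 32)).toNat = c.toNat + 32 := by
  rw [Char.toNat_ofNat]
  have : (c.toNat + 32).isValidChar := Or.inl (by omega)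
  simp [this]

theorem lowerChar_idem (c : Char) :
    PySem.Chars.lowerChar (PySem.Chars.lowerChar c) = PySem.Chars.lowerChar c := by
  unfold PySem.Chars.lowerChar
  by_cases h : PySem.Chars.isupper c = true
  · obtain ⟨h1, h2⟩ := (isupper_iff c).mp h
    have hv := toNat_lower c h1 h2
    have hf : PySem.Chars.isupper (Char.ofNat (c.toNat + 32)) = false := by
      rw [Bool.eq_false_iff]
      intro hc
      obtain ⟨a, b⟩ := (isupper_iff _).mp hc
      omega
    simp [h, hf]
  · simp [h]

theorem isspace_iff (c : Char) : PySem.Chars.isspace c = true ↔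
    (c.toNat = 32 ∨ (9 ≤ c.toNat ∧ c.toNat ≤ 13) ∨ (28 ≤ c.toNat ∧ c.toNat ≤ 31) ∨ c.toNat = 133 ∨
     c.toNat = 160 ∨ c.toNat = 5760 ∨ (8192 ≤ c.toNat ∧ c.toNat ≤ 8202) ∨ c.toNat = 8232 ∨
     c.toNat = 8233 ∨ c.toNat = 8239 ∨ c.toNat = 8287 ∨ c.toNat = 12288) := by
  unfold PySem.Chars.isspace
  simp only [Bool.or_eq_true, Bool.and_eq_true, decide_eq_true_eq]
  tauto

theorem isspace_lowerChar (c : Char) :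
    PySem.Chars.isspace (PySem.Chars.lowerChar c) = PySem.Chars.isspace c := by
  unfold PySem.Chars.lowerChar
  by_cases h : PySem.Chars.isupper c = true
  · obtain ⟨h1, h2⟩ := (isupper_iff c).mp h
    have hv := toNat_lower c h1 h2
    have e1 : PySem.Chars.isspace (Char.ofNat (c.toNat + 32)) = false := by
      rw [Bool.eq_false_iff]; intro hc
      have := (isspace_iff _).mp hc; omega
    have e2 : PySem.Chars.isspace c = false := by
      rw [Bool.eq_false_iff]; intro hc
      have := (isspace_iff _).mp hc; omega
    simp [h, e1, e2]
  · simp [h]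

-- ---- strip ∘ lower is idempotent ----
theorem comp_isspace : (PySem.Chars.isspace ∘ PySem.Chars.lowerChar) = PySem.Chars.isspace :=
  funext isspace_lowerChar

theorem lower_idem (L : List Char) :
    PySem.Chars.lower (PySem.Chars.lower L) = PySem.Chars.lower L := by
  unfold PySem.Chars.lower
  rw [List.map_map]
  exact List.map_congr_left (fun c _ => lowerChar_idem c)

theorem lstrip_lower (L : List Char) :
    PySem.Chars.lstrip (PySem.Chars.lower L) = PySem.Chars.lower (PySem.Chars.lstrip L) := by
  unfold PySem.Chars.lstrip PySem.Chars.lower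
  rw [List.dropWhile_map, comp_isspace]

theorem rstrip_lower (L : List Char) :
    PySem.Chars.rstrip (PySem.Chars.lower L) = PySem.Chars.lower (PySem.Chars.rstrip L) := by
  unfold PySem.Chars.rstrip PySem.Chars.lower
  rw [← List.map_reverse, List.dropWhile_map, comp_isspace, ← List.map_reverse]

theorem strip_lower_comm (L : List Char) :
    PySem.Chars.strip (PySem.Chars.lower L) = PySem.Chars.lower (PySem.Chars.strip L) := by
  unfold PySem.Chars.strip
  rw [lstrip_lower, rstrip_lower]

theorem dropWhile_idem (p : Char → Bool) (l : List Char) :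
    List.dropWhile p (List.dropWhile p l) = List.dropWhile p l := by
  induction l with
  | nil => rfl
  | cons a t ih =>
    by_cases h : p a
    · simp [h, ih]
    · simp [h]

theorem lstrip_of_prefix (p : Char → Bool) (X Y : List Char) (hXY : X <+: Y)
    (hY : List.dropWhile p Y = Y) : List.dropWhile p X = X := by
  rw [List.dropWhile_eq_self_iff] at *
  intro hl
  have := List.IsPrefix.getElem hXY (i := 0) hl
  rw [this]
  exact hY (by have := hXY.length_le; omega)

theorem rstrip_prefix (Y : List Char) : PySem.Chars.rstrip Y <+: Y := by
  unfold PySem.Chars.rstrip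
  rw [← List.reverse_suffix]
  simpa using List.dropWhile_suffix (l := Y.reverse) PySem.Chars.isspace

theorem rstrip_idem (X : List Char) :
    PySem.Chars.rstrip (PySem.Chars.rstrip X) = PySem.Chars.rstrip X := by
  unfold PySem.Chars.rstrip
  rw [List.reverse_reverse, dropWhile_idem]

theorem strip_idem (L : List Char) :
    PySem.Chars.strip (PySem.Chars.strip L) = PySem.Chars.strip L := by
  have hY : List.dropWhile PySem.Chars.isspace (PySem.Chars.lstrip L) = PySem.Chars.lstrip L :=
    dropWhile_idem _ L
  show PySem.Chars.strip (PySem.Chars.rstrip (PySem.Chars.lstrip L)) = _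
  unfold PySem.Chars.strip
  have h1 : PySem.Chars.lstrip (PySem.Chars.rstrip (PySem.Chars.lstrip L)) =
      PySem.Chars.rstrip (PySem.Chars.lstrip L) :=
    lstrip_of_prefix _ _ _ (rstrip_prefix _) hY
  rw [h1, rstrip_idem]

theorem norm_idem (s : String) :
    PySem.Str.strip (PySem.Str.lower (PySem.Str.strip (PySem.Str.lower s))) =
      PySem.Str.strip (PySem.Str.lower s) := by
  unfold PySem.Str.strip PySem.Str.lower
  simp only [String.toList_ofList]
  rw [← strip_lower_comm, lower_idem, strip_idem]

-- ---- the match predicate ----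
def MB (k u : String) : Bool := (u == k) || PySem.Str.endswith u ("." ++ k)

theorem MB_iff (k u : String) : MB k u = true ↔ u = k ∨ ('.' :: k.toList) <:+ u.toList := by
  unfold MB
  rw [Bool.or_eq_true, beq_iff_eq, PySem.Str.endswith_eq, PySem.Chars.endswith_iff]
  have : ("." ++ k).toList = '.' :: k.toList := by
    rw [String.toList_append]; rfl
  rw [this]

theorem match_eq (u k : String) (hu : PySem.Str.strip (PySem.Str.lower u) = u)
    (hk : PySem.Str.strip (PySem.Str.lower k) = k) :
    match_domain_py u k = MB k u := by
  unfold match_domain_py MB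
  simp only [hu, hk]
  by_cases h : u == k
  · simp [h]
  · by_cases h2 : PySem.Str.endswith u ("." ++ k) <;> simp [h]

theorem keysNorm : ∀ kv ∈ AFP.items, PySem.Str.strip (PySem.Str.lower kv.1) = kv.1 := by decide

theorem keysND : AFP.keys.Nodup := by decide

-- nested keys of AFP share their value
theorem AGfin : ∀ kv ∈ AFP.items, ∀ kv' ∈ AFP.items,
    (kv.1 = kv'.1 ∨ ('.' :: kv.1.toList) <:+ kv'.1.toList ∨ ('.' :: kv'.1.toList) <:+ kv.1.toList) →
    kv.2 = kv'.2 := by decide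

theorem toList_inj {a b : String} (h : a.toList = b.toList) : a = b := by
  have := congrArg String.ofList h
  simpa [String.ofList_toList] using this

theorem agree (u : String) (kv kv' : String × Option String)
    (h1 : kv ∈ AFP.items) (h2 : kv' ∈ AFP.items)
    (m1 : MB kv.1 u = true) (m2 : MB kv'.1 u = true) : kv.2 = kv'.2 := by
  rcases (MB_iff kv.1 u).mp m1 with e1 | s1
  · rcases (MB_iff kv'.1 u).mp m2 with e2 | s2
    · exact AGfin kv h1 kv' h2 (Or.inl (e1 ▸ e2 ▸ rfl))
    · exact AGfin kv h1 kv' h2 (Or.inr (Or.inr (by rwa [← e1])))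
  · rcases (MB_iff kv'.1 u).mp m2 with e2 | s2
    · exact AGfin kv h1 kv' h2 (Or.inr (Or.inl (by rwa [← e2])))
    · rcases List.suffix_or_suffix_of_suffix s1 s2 with h | h
      · rcases List.suffix_cons_iff.mp h with h' | h'
        · have h'' : kv.1.toList = kv'.1.toList := by injection h'
          exact AGfin kv h1 kv' h2 (Or.inl (toList_inj h''))
        · exact AGfin kv h1 kv' h2 (Or.inr (Or.inl h'))
      · rcases List.suffix_cons_iff.mp h with h' | h'
        · have h'' : kv'.1.toList = kv.1.toList := by injection h'
          exact AGfin kv h1 kv' h2 (Or.inl (toList_inj h'').symm)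
        · exact AGfin kv h1 kv' h2 (Or.inr (Or.inr h'))

-- ---- characterization of A's body ----
theorem contains_iff (s : String) : AFP.contains s = true ↔ ∃ v, (s, v) ∈ AFP.items := by
  rw [PySem.Dict.contains_mk]
  rw [List.any_eq_true]
  constructor
  · rintro ⟨kv, hmem, hbeq⟩
    have : kv.1 = s := by simpa using hbeq
    exact ⟨kv.2, by rwa [← this, Prod.mk.eta]⟩
  · rintro ⟨v, hv⟩
    exact ⟨(s, v), hv, by simp⟩

theorem find?_congr_mem {α : Type} (p q : α → Bool) (l : List α)
    (h : ∀ a ∈ l, p a = q a) : l.find? p = l.find? q := by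
  induction l with
  | nil => rfl
  | cons a t ih =>
    rw [List.find?_cons, List.find?_cons, h a (List.mem_cons_self)]
    cases q a
    · exact ih (fun x hx => h x (List.mem_cons_of_mem a hx))
    · rfl

-- proof-side abbreviation of A's body with the simplified match predicate
def AbodyMB (u : String) : Option String :=
  if AFP.contains u then (AFP.get? u).getD none
  else match AFP.items.find? (fun kv => MB kv.1 u) with
    | some kv => kv.2
    | none => some "aff"

theorem Abody_eq (domain : String) :
    get_param_name_py domain = AbodyMB (PySem.Str.strip (PySem.Str.lower domain)) := by
  unfold get_param_name_py AbodyMB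
  have h : AFP.items.find? (fun kv => match_domain_py (PySem.Str.strip (PySem.Str.lower domain)) kv.1)
      = AFP.items.find? (fun kv => MB kv.1 (PySem.Str.strip (PySem.Str.lower domain))) :=
    find?_congr_mem _ _ _ (fun kv hkv =>
      match_eq (PySem.Str.strip (PySem.Str.lower domain)) kv.1 (norm_idem domain) (keysNorm kv hkv))
  rw [h]

theorem LA1 (u : String)
    (hm : ∀ kv ∈ AFP.items, MB kv.1 u = false) : AbodyMB u = some "aff" := by
  unfold AbodyMB
  have hcon : ¬ AFP.contains u = true := by
    intro hc
    obtain ⟨v, hv⟩ := (contains_iff u).mp hc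
    have := hm (u, v) hv
    rw [show MB (u, v).1 u = true from by unfold MB; simp] at this
    exact Bool.noConfusion this
  rw [if_neg hcon]
  have h : AFP.items.find? (fun kv => MB kv.1 u) = none :=
    List.find?_eq_none.mpr (fun kv hkv => by rw [hm kv hkv]; exact Bool.noConfusion)
  rw [h]

theorem LA2 (u : String)
    (hm : ∃ kv ∈ AFP.items, MB kv.1 u = true) :
    ∃ kv ∈ AFP.items, MB kv.1 u = true ∧ AbodyMB u = kv.2 := by
  unfold AbodyMB
  by_cases hcon : AFP.contains u = true
  · obtain ⟨v, hv⟩ := (contains_iff u).mp hcon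
    have hget : AFP.get? u = some v := PySem.Dict.get?_of_mem_items AFP hv keysND
    refine ⟨(u, v), hv, by unfold MB; simp, ?_⟩
    rw [if_pos hcon, hget]
    rfl
  · rw [if_neg hcon]
    cases hfind : AFP.items.find? (fun kv => MB kv.1 u) with
    | none =>
      exfalso
      obtain ⟨kv, hkv, hkvm⟩ := hm
      have := List.find?_eq_none.mp hfind kv hkv
      simp [hkvm] at this
    | some kv =>
      exact ⟨kv, List.mem_of_find?_eq_some hfind, by simpa using List.find?_some hfind, rfl⟩

-- ---- suffix-chain facts for B's loop ----
theorem drop_dot (c : List Char) (n : Nat) (h : ['.'] <+: c.drop n) :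
    c.drop n = '.' :: c.drop (n + 1) := by
  obtain ⟨t, ht⟩ := h
  have h1 : c.drop n = '.' :: t := by simpa using ht.symm
  have h2 : c.drop (n + 1) = t := by
    have h3 : List.drop 1 (List.drop n c) = List.drop (n + 1) c := List.drop_drop
    rw [← h3, h1]
    rfl
  rw [h1, h2]

theorem suffix_trans_of_I (u : String) (c : List Char)
    (hI : c = u.toList ∨ ('.' :: c) <:+ u.toList) : c <:+ u.toList := by
  rcases hI with h | h
  · exact h ▸ List.suffix_refl _
  · exact (List.suffix_cons '.' c).trans h

theorem MB_of_I (u : String) (c : List Char)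
    (hI : c = u.toList ∨ ('.' :: c) <:+ u.toList) :
    MB (String.ofList c) u = true := by
  rw [MB_iff]
  rcases hI with h | h
  · exact Or.inl (toList_inj (by simpa using h)).symm
  · exact Or.inr (by simpa using h)

theorem keysNE : ∀ kv ∈ AFP.items, kv.1.toList ≠ [] := by decide

-- ---- characterization of B's loop ----
theorem LB1aux (u : String) (hm : ∀ kv ∈ AFP.items, MB kv.1 u = false) :
    ∀ N, ∀ c : List Char, c.length ≤ N →
      (c = u.toList ∨ ('.' :: c) <:+ u.toList) → altLoop c = some "aff" := by
  intro N
  induction N with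
  | zero =>
    intro c hlen hI
    have hc : c = [] := List.eq_nil_of_length_eq_zero (by omega)
    subst hc
    rw [altLoop]
    rw [if_neg (by decide), dif_pos (by decide)]
  | succ N ih =>
    intro c hlen hI
    rw [altLoop]
    have hcon : ¬ AFP.contains (String.ofList c) = true := by
      intro hc
      obtain ⟨v, hv⟩ := (contains_iff _).mp hc
      have h1 := hm (String.ofList c, v) hv
      have h2 := MB_of_I u c hI
      simp only [h1] at h2
      exact Bool.noConfusion h2
    rw [if_neg hcon]
    by_cases hdot : PySem.Chars.find c ['.'] = -1
    · rw [dif_pos hdot]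
    · rw [dif_neg hdot]
      have h0 : 0 ≤ PySem.Chars.find c ['.'] := by
        have := PySem.Chars.neg_one_le_find c ['.']
        omega
      have hne : c ≠ [] := by
        intro h; subst h
        exact absurd ((PySem.Chars.find_nonneg_iff [] ['.']).mp h0).length_le (by simp)
      have hdc := drop_dot c (PySem.Chars.find c ['.']).toNat
        (PySem.Chars.find_spec h0).1
      apply ih _ ?_ ?_
      · have hcl : 0 < c.length := List.length_pos_iff.mpr hne
        simp only [List.length_drop]
        omega
      · refine Or.inr (List.IsSuffix.trans ?_ (suffix_trans_of_I u c hI))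
        rw [← hdc]
        exact List.drop_suffix _ _

theorem LB2aux (u : String) :
    ∀ N, ∀ c : List Char, c.length ≤ N →
      (c = u.toList ∨ ('.' :: c) <:+ u.toList) →
      ∀ kv ∈ AFP.items, (kv.1.toList = c ∨ ('.' :: kv.1.toList) <:+ c) →
      ∃ kv' ∈ AFP.items, MB kv'.1 u = true ∧ altLoop c = kv'.2 := by
  intro N
  induction N with
  | zero =>
    intro c hlen hI kv hkv hJ
    exfalso
    have hc : c = [] := List.eq_nil_of_length_eq_zero (by omega)
    subst hc
    rcases hJ with h | h
    · exact keysNE kv hkv h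
    · exact absurd h.length_le (by simp)
  | succ N ih =>
    intro c hlen hI kv hkv hJ
    rw [altLoop]
    by_cases hcon : AFP.contains (String.ofList c) = true
    · obtain ⟨v, hv⟩ := (contains_iff _).mp hcon
      have hget : AFP.get? (String.ofList c) = some v := PySem.Dict.get?_of_mem_items AFP hv keysND
      exact ⟨(String.ofList c, v), hv, MB_of_I u c hI, by rw [if_pos hcon, hget]; rfl⟩
    · rw [if_neg hcon]
      rcases hJ with hEq | hSuf
      · exfalso
        apply hcon
        rw [contains_iff]
        refine ⟨kv.2, ?_⟩
        have hkc : String.ofList c = kv.1 := by rw [← hEq, String.ofList_toList]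
        rw [hkc, Prod.mk.eta]
        exact hkv
      · obtain ⟨pre, hpre⟩ := hSuf
        have hinf : ['.'] <:+: c := ⟨pre, kv.1.toList, by simpa using hpre⟩
        have h0 : 0 ≤ PySem.Chars.find c ['.'] := (PySem.Chars.find_nonneg_iff c ['.']).mpr hinf
        have hdot : ¬ PySem.Chars.find c ['.'] = -1 := by omega
        rw [dif_neg hdot]
        have hspec := PySem.Chars.find_spec (s := c) (sub := ['.']) h0
        have hdc := drop_dot c (PySem.Chars.find c ['.']).toNat hspec.1
        have hq : c.drop pre.length = '.' :: kv.1.toList := by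
          rw [← hpre]
          simp
        have hqn : (PySem.Chars.find c ['.']).toNat ≤ pre.length := by
          by_contra hlt
          exact absurd (show ['.'] <+: c.drop pre.length from hq ▸ ⟨kv.1.toList, rfl⟩)
            (hspec.2 pre.length (by omega))
        have hne : c ≠ [] := by
          intro h; subst h
          simp at hq
        have hcl : 0 < c.length := List.length_pos_iff.mpr hne
        have hlen' : (c.drop ((PySem.Chars.find c ['.']).toNat + 1)).length ≤ N := by
          simp only [List.length_drop]
          omega
        have hI' : c.drop ((PySem.Chars.find c ['.']).toNat + 1) = u.toList ∨
            ('.' :: c.drop ((PySem.Chars.find c ['.']).toNat + 1)) <:+ u.toList := by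
          refine Or.inr (List.IsSuffix.trans ?_ (suffix_trans_of_I u c hI))
          rw [← hdc]
          exact List.drop_suffix _ _
        have hlc : c.length = pre.length + kv.1.toList.length + 1 := by
          rw [← hpre]
          simp
          omega
        by_cases hnq : (PySem.Chars.find c ['.']).toNat = pre.length
        · have hkeq : c.drop ((PySem.Chars.find c ['.']).toNat + 1) = kv.1.toList := by
            rw [hnq] at hdc
            have h2 : ('.' : Char) :: kv.1.toList = '.' :: c.drop (pre.length + 1) :=
              hq.symm.trans hdc
            have h3 : kv.1.toList = c.drop (pre.length + 1) := by injection h2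
            rw [hnq]
            exact h3.symm
          exact ih _ hlen' hI' kv hkv (Or.inl hkeq.symm)
        · have hlt : (PySem.Chars.find c ['.']).toNat < pre.length := lt_of_le_of_ne hqn hnq
          have hck : ('.' :: kv.1.toList) <:+ c := ⟨pre, hpre⟩
          have hc' : c.drop ((PySem.Chars.find c ['.']).toNat + 1) <:+ c := List.drop_suffix _ _
          rcases List.suffix_or_suffix_of_suffix hck hc' with h | h
          · exact ih _ hlen' hI' kv hkv (Or.inr h)
          · have hlen2 := h.length_le
            have heq : (c.drop ((PySem.Chars.find c ['.']).toNat + 1)).length =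
                ('.' :: kv.1.toList).length := by
              simp only [List.length_drop, List.length_cons] at hlen2 ⊢
              omega
            have hfeq := h.eq_of_length heq
            refine ih _ hlen' hI' kv hkv (Or.inr ?_)
            rw [← hfeq]

-- ===== VERDICT (by name: the statement is the Claim_ definition above) =====
theorem get_param_name_py_spec : Claim_equal_get_param_name_py := by
  intro domain _
  unfold Spec_get_param_name_py get_param_name_py_alt
  rw [Abody_eq domain]
  set u := PySem.Str.strip (PySem.Str.lower domain) with hudef
  by_cases hm : ∀ kv ∈ AFP.items, MB kv.1 u = false
  · rw [LA1 u hm, LB1aux u hm u.toList.length u.toList le_rfl (Or.inl rfl)]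
  · have hm' : ∃ kv ∈ AFP.items, MB kv.1 u = true := by
      by_contra h
      exact hm (fun kv hkv => by
        cases hb : MB kv.1 u
        · rfl
        · exact absurd ⟨kv, hkv, hb⟩ h)
    obtain ⟨kva, hkva, hkvam, hA⟩ := LA2 u hm'
    obtain ⟨kv, hkv, hkvm⟩ := hm'
    have hJ : kv.1.toList = u.toList ∨ ('.' :: kv.1.toList) <:+ u.toList := by
      rcases (MB_iff kv.1 u).mp hkvm with h | h
      · exact Or.inl (congrArg String.toList h.symm)
      · exact Or.inr h
    obtain ⟨kvb, hkvb, hkvbm, hB⟩ :=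
      LB2aux u u.toList.length u.toList le_rfl (Or.inl rfl) kv hkv hJ
    rw [hA, hB]
    exact agree u kva kvb hkva hkvb hkvam hkvbm
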